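-- pv_equiv track=rewrite | github.com/rossbrg/flighty_import | flighty/scanner.py | _build_or_query
-- ===== SOURCE A (Python) =====
-- def _build_or_query(terms, field="FROM"):
--     """Build an IMAP OR query from multiple terms.
--
--     IMAP OR syntax: OR (FROM "a") (FROM "b") for 2 terms
--     For 3+ terms: OR (FROM "a") (OR (FROM "b") (FROM "c"))
--
--     Args:
--         terms: List of search terms
--         field: IMAP field to search (FROM, SUBJECT, etc.)
--
--     Returns:
--         IMAP search query string
--     """
--     if not terms:
--         return None
--     if len(terms) == 1:
--         return f'({field} "{terms[0]}")'
--
--     # Build nested OR query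
--     query = f'({field} "{terms[-1]}")'
--     for term in reversed(terms[:-1]):
--         query = f'(OR ({field} "{term}") {query})'
--     return query
-- ===== SOURCE B (Python) =====
-- def _build_or_query(terms, field="FROM"):
--     """Recursive decomposition: one term -> base parenthesised atom,
--     more terms -> OR of the head atom with the recursively built tail."""
--     if not terms:
--         return None
--
--     def rec(ts):
--         if len(ts) == 1:
--             return f'({field} "{ts[0]}")'
--         return f'(OR ({field} "{ts[0]}") {rec(ts[1:])})'
--
--     return rec(terms)
-- ===== Notes on version B (the rewrite author's own statement) =====
-- stated objective: simpler
-- what changed: Replaced A's backwards foldl (start from the last term, wrap each earlier term around the accumulator while iterating over reversed(terms[:-1])) with a direct head-first recursion over the list that builds the same right-nested OR string top-down.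
import Mathlib
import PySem

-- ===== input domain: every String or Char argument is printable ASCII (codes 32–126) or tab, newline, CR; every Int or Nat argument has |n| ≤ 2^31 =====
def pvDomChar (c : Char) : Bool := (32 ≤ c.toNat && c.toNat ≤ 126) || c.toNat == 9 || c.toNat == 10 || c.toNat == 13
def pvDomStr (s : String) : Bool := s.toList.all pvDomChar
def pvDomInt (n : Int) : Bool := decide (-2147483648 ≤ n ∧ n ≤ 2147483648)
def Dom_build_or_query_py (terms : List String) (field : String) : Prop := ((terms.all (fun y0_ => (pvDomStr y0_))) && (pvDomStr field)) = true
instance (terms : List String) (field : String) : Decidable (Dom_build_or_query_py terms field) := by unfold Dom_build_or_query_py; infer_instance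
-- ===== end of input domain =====

-- B changes the decomposition only: head-first recursion instead of A's reversed-prefix fold; same output strings.
-- ===== PORT A =====
def parenA (field t : String) : String := "(" ++ field ++ " \"" ++ t ++ "\")"

-- A: empty -> None; single -> atom; else start from terms[-1] and fold over reversed(terms[:-1]).
def build_or_query_py (terms : List String) (field : String) : Option String :=
  match terms with
  | [] => none
  | t :: ts =>
    if ts.isEmpty then some (parenA field t)
    else
      -- terms[-1] on a nonempty list = getLastD; terms[:-1] = dropLast
      some ((((t :: ts).dropLast).reverse).foldl
        (fun query term => "(OR " ++ parenA field term ++ " " ++ query ++ ")")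
        (parenA field ((t :: ts).getLastD "")))

-- ===== PORT B =====
def parenB (field t : String) : String := "(" ++ field ++ " \"" ++ t ++ "\")"

def recB (field : String) : String → List String → String
  | t, [] => parenB field t
  | t, u :: us => "(OR " ++ parenB field t ++ " " ++ recB field u us ++ ")"

def build_or_query_py_alt (terms : List String) (field : String) : Option String :=
  match terms with
  | [] => none
  | t :: ts => some (recB field t ts)

-- ===== PRECONDITION & SPEC =====
def Spec_build_or_query_py (terms : List String) (field : String) (out : Option String) : Prop := out = build_or_query_py_alt terms field
instance (terms : List String) (field : String) (out : Option String) : Decidable (Spec_build_or_query_py terms field out) := by unfold Spec_build_or_query_py; infer_instance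

-- ===== CLAIM (what is proved, stated in full; the proofs are below) =====
def Claim_equal_build_or_query_py : Prop := ∀ (terms : List String) (field : String), Dom_build_or_query_py terms field → Spec_build_or_query_py terms field (build_or_query_py terms field)

-- ===== LEMMAS AND PROOFS =====
theorem key (field : String) : ∀ (ts : List String) (t : String),
    (((t :: ts).dropLast).reverse).foldl
      (fun query term => "(OR " ++ parenA field term ++ " " ++ query ++ ")")
      (parenA field ((t :: ts).getLastD "")) = recB field t ts := by
  intro ts
  induction ts with
  | nil => intro t; simp [recB, parenA, parenB]
  | cons u us ih =>
    intro t
    have h1 : ((t :: u :: us).dropLast) = t :: (u :: us).dropLast := rfl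
    have h2 : ((t :: u :: us).getLastD "") = ((u :: us).getLastD "") := by
      simp [List.getLastD]
    rw [h1, h2, List.reverse_cons, List.foldl_append, ih u]
    simp [recB, parenA, parenB]

-- ===== VERDICT (by name: the statement is the Claim_ definition above) =====
theorem build_or_query_py_spec : Claim_equal_build_or_query_py := by
  intro terms field _
  unfold Spec_build_or_query_py build_or_query_py build_or_query_py_alt
  match terms with
  | [] => rfl
  | t :: ts =>
    cases ts with
    | nil => simp [parenA, parenB, recB]
    | cons u us =>
      exact congrArg some (key field (u :: us) t)
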